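-- pv_equiv track=rewrite | github.com/randy-25/Tubes-Daspro | personalCommand.py | getBangunan
-- ===== SOURCE A (Python) =====
-- def getBangunan(length:int,category:int,StringOF:str) ->list:
--     if length == 0:
--         data = [['pasir','butiran dari pantai','0'],['batu','benda yang keras','0'],['air','benda cair','0']]
--         length = 3
--     else:
--         data = [['' for i in range (category)] for j in range(length)]
--         i = 0
--         j = 0
--         for k in range(len(StringOF)) :
--             if StringOF[k] == ';':
--                 j += 1
--             if StringOF[k] == '\n':
--                 j = 0
--                 i+=1
--             if i >=(length) :
--                 break
--             if StringOF[k] != ';' and StringOF[k] != '\n':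
--                 data[i][j] += StringOF[k]
--     return data,length
-- ===== SOURCE B (Python) =====
-- def getBangunan(length: int, category: int, StringOF: str) -> list:
--     if length == 0:
--         return [['pasir', 'butiran dari pantai', '0'],
--                 ['batu', 'benda yang keras', '0'],
--                 ['air', 'benda cair', '0']], 3
--     rows = StringOF.split('\n')
--     data = []
--     for i in range(max(length, 0)):
--         cells = rows[i].split(';') if i < len(rows) else []
--         data.append([cells[j] if j < len(cells) else '' for j in range(max(category, 0))])
--     return data, length
-- ===== Notes on version B (the rewrite author's own statement) =====
-- stated objective: idiomatic
-- what changed: Replaces A's character-by-character scan with mutable row/column counters and in-place cell mutation by an idiomatic split-based construction: split on '\n', then per row split on ';' and build each row directly by index; Pre_ excludes the inputs where A raises IndexError (a non-empty cell at column >= category in the first `length` lines), where B returns the grid with out-of-range cells dropped.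
import Mathlib
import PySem

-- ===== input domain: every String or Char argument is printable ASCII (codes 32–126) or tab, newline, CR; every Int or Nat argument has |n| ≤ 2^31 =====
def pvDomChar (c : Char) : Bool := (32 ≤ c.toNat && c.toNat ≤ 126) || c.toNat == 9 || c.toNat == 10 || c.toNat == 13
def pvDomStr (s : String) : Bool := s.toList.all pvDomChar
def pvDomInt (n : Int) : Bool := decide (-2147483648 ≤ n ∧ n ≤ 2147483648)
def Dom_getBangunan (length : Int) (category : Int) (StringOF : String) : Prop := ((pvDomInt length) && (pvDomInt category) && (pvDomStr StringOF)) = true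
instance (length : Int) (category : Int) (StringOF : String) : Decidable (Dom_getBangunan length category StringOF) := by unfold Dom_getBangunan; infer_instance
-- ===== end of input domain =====

-- B is a simpler and more idiomatic re-implementation: it splits the string on '\n'
-- and ';' and builds each row directly, instead of A's character-by-character scan
-- with mutable row/column counters. Equivalence is claimed on Pre_ (the inputs where
-- the Python A returns without raising IndexError).

-- ===== PORT A =====
-- data[i][j] += c  (only reached in-range under Pre_; out-of-range modify is a no-op)
def pyAppendAt (data : List (List String)) (i j : Nat) (c : Char) : List (List String) :=
  data.modify i (fun row => row.modify j (fun s => s.push c))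

-- the `for k in range(len(StringOF))` loop of A, with its break
def getBangunanLoop (length : Int) (data : List (List String)) (i j : Nat) :
    List Char → List (List String)
  | [] => data
  | c :: rest =>
    let j1 : Nat := if c = ';' then j + 1 else j
    let i1 : Nat := if c = '\n' then i + 1 else i
    let j2 : Nat := if c = '\n' then 0 else j1
    if length ≤ (i1 : Int) then data
    else if c ≠ ';' ∧ c ≠ '\n' then
      getBangunanLoop length (pyAppendAt data i1 j2 c) i1 j2 rest
    else getBangunanLoop length data i1 j2 rest

def getBangunan (length : Int) (category : Int) (StringOF : String) : List (List String) × Int :=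
  if length = 0 then
    ([["pasir", "butiran dari pantai", "0"], ["batu", "benda yang keras", "0"],
      ["air", "benda cair", "0"]], 3)
  else
    let data := (List.range length.toNat).map (fun _ => List.replicate category.toNat "")
    (getBangunanLoop length data 0 0 StringOF.toList, length)

-- ===== PORT B =====
def getBangunan_alt (length : Int) (category : Int) (StringOF : String) : List (List String) × Int :=
  if length = 0 then
    ([["pasir", "butiran dari pantai", "0"], ["batu", "benda yang keras", "0"],
      ["air", "benda cair", "0"]], 3)
  else
    let rows := PySem.Chars.splitOn StringOF.toList ['\n']
    let data := (List.range length.toNat).map (fun i =>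
      let cells := if h : i < rows.length then PySem.Chars.splitOn rows[i] [';'] else []
      (List.range category.toNat).map (fun j =>
        if h : j < cells.length then String.ofList cells[j] else ""))
    (data, length)

-- ===== PRECONDITION & SPEC =====
-- Pre_ excludes exactly the inputs on which the Python A raises IndexError: a non-empty
-- cell whose column index is ≥ category inside one of the first `length` lines.
def Pre_getBangunan (length : Int) (category : Int) (StringOF : String) : Prop :=
  length = 0 ∨
    ∀ line ∈ (PySem.Chars.splitOn StringOF.toList ['\n']).take length.toNat,
      ∀ p ∈ (PySem.Chars.splitOn line [';']).zipIdx, p.1 ≠ [] → (p.2 : Int) < category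

instance (length : Int) (category : Int) (StringOF : String) :
    Decidable (Pre_getBangunan length category StringOF) := by
  unfold Pre_getBangunan; infer_instance

def pvWitness_getBangunan : Int × Int × String := (2, 2, "a;b\nc")

def Spec_getBangunan (length : Int) (category : Int) (StringOF : String)
    (out : List (List String) × Int) : Prop := out = getBangunan_alt length category StringOF
instance (length : Int) (category : Int) (StringOF : String) (out : List (List String) × Int) : Decidable (Spec_getBangunan length category StringOF out) := by
  unfold Spec_getBangunan; infer_instance

-- ===== CLAIM (what is proved, stated in full; the proofs are below) =====
def Claim_equal_getBangunan : Prop := ∀ (length : Int) (category : Int) (StringOF : String), Dom_getBangunan length category StringOF → Pre_getBangunan length category StringOF → Spec_getBangunan length category StringOF (getBangunan length category StringOF)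


-- ===== LEMMAS AND PROOFS =====

def sp1 (c0 : Char) : List Char → List (List Char)
  | [] => [[]]
  | c :: rest =>
    if c = c0 then [] :: sp1 c0 rest
    else match sp1 c0 rest with
      | [] => [[c]]
      | p :: ps => (c :: p) :: ps

theorem sp1_ne_nil (c0 : Char) (l : List Char) : sp1 c0 l ≠ [] := by
  cases l with
  | nil => simp [sp1]
  | cons c rest =>
    simp only [sp1]
    split
    · simp
    · split <;> simp

theorem go_single (c0 : Char) (fuel : Nat) (l cur : List Char) (acc : List (List Char))
    (h : l.length < fuel) :
    PySem.Chars.splitOn.go [c0] fuel l cur acc =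
      acc.reverse ++ (match sp1 c0 l with
        | [] => []
        | p :: ps => (cur.reverse ++ p) :: ps) := by
  induction l generalizing fuel cur acc with
  | nil =>
    cases fuel with
    | zero => omega
    | succ n => simp [PySem.Chars.splitOn.go, sp1]
  | cons c rest ih =>
    cases fuel with
    | zero => omega
    | succ n =>
      simp only [List.length_cons] at h
      rw [PySem.Chars.splitOn.go]
      by_cases hc : c = c0
      · subst hc
        simp only [List.isPrefixOf, BEq.rfl, Bool.true_and, List.isPrefixOf_nil_left, if_true,
          List.length_cons]
        show PySem.Chars.splitOn.go [c] n (List.drop 1 (c :: rest)) [] (cur.reverse :: acc) = _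
        simp only [List.drop_one, List.tail_cons]
        rw [ih n [] (cur.reverse :: acc) (by omega)]
        simp only [sp1, if_true]
        rcases hr : sp1 c rest with _ | ⟨p, ps⟩
        · exact absurd hr (sp1_ne_nil c rest)
        · simp
      · have hpre : [c0].isPrefixOf (c :: rest) = false := by
          simp [List.isPrefixOf]; exact fun h => absurd h.symm hc
        simp only [hpre, Bool.false_eq_true, if_false]
        rw [ih n (c :: cur) acc (by omega)]
        simp only [sp1, if_neg hc]
        rcases hr : sp1 c0 rest with _ | ⟨p, ps⟩
        · exact absurd hr (sp1_ne_nil c0 rest)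
        · simp

theorem splitOn_eq_sp1 (c0 : Char) (l : List Char) :
    PySem.Chars.splitOn l [c0] = sp1 c0 l := by
  rw [PySem.Chars.splitOn, go_single c0 (l.length + 1) l [] [] (by omega)]
  rcases hr : sp1 c0 l with _ | ⟨p, ps⟩
  · exact absurd hr (sp1_ne_nil c0 l)
  · simp

theorem sp1_cons_self (c0 : Char) (rest : List Char) :
    sp1 c0 (c0 :: rest) = [] :: sp1 c0 rest := by
  simp [sp1]

theorem sp1_cons_ne (c0 c : Char) (rest : List Char) (h : c ≠ c0) (p : List Char)
    (ps : List (List Char)) (hr : sp1 c0 rest = p :: ps) :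
    sp1 c0 (c :: rest) = (c :: p) :: ps := by
  simp [sp1, h, hr]

def rowFill (row : List String) (j : Nat) : List (List Char) → List String
  | [] => row
  | cell :: cells => rowFill (row.modify j (fun s => s ++ String.ofList cell)) (j+1) cells

def fillLines (length : Int) (data : List (List String)) (i : Nat) :
    List (List Char) → List (List String)
  | [] => data
  | line :: rest =>
    let d := data.modify i (fun row => rowFill row 0 (sp1 ';' line))
    if length ≤ (i : Int) + 1 then d else fillLines length d (i+1) rest

-- small helpers
theorem modify_append_cons {α : Type} (pref : List α) (x : α) (rest : List α) (f : α → α) :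
    (pref ++ x :: rest).modify pref.length f = pref ++ f x :: rest := by
  induction pref with
  | nil => simp [List.modify]
  | cons a as ih => simpa [List.modify] using ih

theorem push_append_ofList (s : String) (c : Char) (p : List Char) :
    (fun t => t ++ String.ofList p) ((fun t => t.push c) s) = s ++ String.ofList (c :: p) := by
  apply String.toList_inj.mp; simp

theorem append_ofList_nil (s : String) : s ++ String.ofList [] = s := by
  apply String.toList_inj.mp; simp

theorem rowFill_nil_cell (row : List String) (j : Nat) (cells : List (List Char)) :
    rowFill row j ([] :: cells) = rowFill row (j+1) cells := by
  simp only [rowFill]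
  congr 1
  have : (fun s => s ++ String.ofList ([] : List Char)) = id := by
    funext s; exact append_ofList_nil s
  rw [this, List.modify_id]


theorem loop_cons (length : Int) (data : List (List String)) (i j : Nat) (c : Char) (rest : List Char) :
    getBangunanLoop length data i j (c :: rest) =
      if length ≤ ((if c = '\n' then i + 1 else i : Nat) : Int) then data
      else if c ≠ ';' ∧ c ≠ '\n' then
        getBangunanLoop length
          (pyAppendAt data (if c = '\n' then i + 1 else i)
            (if c = '\n' then 0 else if c = ';' then j + 1 else j) c)
          (if c = '\n' then i + 1 else i) (if c = '\n' then 0 else if c = ';' then j + 1 else j) rest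
      else getBangunanLoop length data (if c = '\n' then i + 1 else i)
        (if c = '\n' then 0 else if c = ';' then j + 1 else j) rest := rfl

-- L2: a '\n'-free chunk of the input fills columns of row i
theorem loop_line (length : Int) (cs : List Char) (h : '\n' ∉ cs) (rest : List Char) :
    ∀ (data : List (List String)) (i j : Nat), (i : Int) < length →
    getBangunanLoop length data i j (cs ++ rest) =
      getBangunanLoop length (data.modify i (fun row => rowFill row j (sp1 ';' cs))) i
        (j + (sp1 ';' cs).length - 1) rest := by
  induction cs with
  | nil =>
    intro data i j hi
    simp only [List.nil_append, sp1, rowFill_nil_cell, rowFill, List.modify_id,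
      List.length_cons, List.length_nil, Nat.add_sub_cancel]
    rw [show (fun (row : List String) => row) = (id : List String → List String) from rfl,
      List.modify_id]
  | cons c cs ih =>
    intro data i j hi
    have hcn : c ≠ '\n' := by rintro rfl; exact h (List.mem_cons_self)
    have h' : '\n' ∉ cs := fun hm => h (List.mem_cons_of_mem _ hm)
    by_cases hc : c = ';'
    · subst hc
      rw [List.cons_append, loop_cons]
      simp only [if_neg (by decide : ¬ (';':Char) = '\n'), if_neg (not_le.mpr hi),
        if_neg (by simp : ¬ ((';':Char) ≠ ';' ∧ (';':Char) ≠ '\n')), if_pos rfl, if_true]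
      rw [ih h' data i (j+1) hi, sp1_cons_self]
      simp only [rowFill_nil_cell]
      have hlen : 1 ≤ (sp1 ';' cs).length := List.length_pos_iff.mpr (sp1_ne_nil ';' cs)
      congr 1
      simp only [List.length_cons]
      omega
    · rw [List.cons_append, loop_cons]
      simp only [if_neg hcn, if_neg (not_le.mpr hi), if_pos (⟨hc, hcn⟩ : c ≠ ';' ∧ c ≠ '\n'),
        if_neg hc]
      rw [ih h' (pyAppendAt data i j c) i j hi]
      simp only [pyAppendAt, List.modify_modify_eq]
      rcases hr : sp1 ';' cs with _ | ⟨p, ps⟩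
      · exact absurd hr (sp1_ne_nil ';' cs)
      · rw [sp1_cons_ne ';' c cs hc p ps hr]
        simp only [List.length_cons]
        have hfe : ((fun row => rowFill row j (p :: ps)) ∘
              fun (row : List String) => row.modify j (fun s => s.push c)) =
            fun row => rowFill row j ((c :: p) :: ps) := by
          funext row
          simp only [Function.comp, rowFill, List.modify_modify_eq]
          congr 2
          funext s
          exact push_append_ofList s c p
        rw [hfe]

theorem sp1_decomp (c0 : Char) (cs : List Char) :
    (c0 ∉ cs ∧ sp1 c0 cs = [cs]) ∨
      ∃ line rest, cs = line ++ c0 :: rest ∧ c0 ∉ line ∧ sp1 c0 cs = line :: sp1 c0 rest := by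
  induction cs with
  | nil => exact Or.inl ⟨by simp, by simp [sp1]⟩
  | cons c cs ih =>
    by_cases hc : c = c0
    · subst hc
      exact Or.inr ⟨[], cs, by simp, by simp, sp1_cons_self c cs⟩
    · rcases ih with ⟨hnm, hs⟩ | ⟨line, rest, hcs, hnm, hs⟩
      · refine Or.inl ⟨by simp [hnm]; exact fun h => hc h.symm, ?_⟩
        exact sp1_cons_ne c0 c cs hc cs [] hs
      · refine Or.inr ⟨c :: line, rest, by simp [hcs],
          by simp [hnm]; exact fun h => hc h.symm, ?_⟩
        exact sp1_cons_ne c0 c cs hc line (sp1 c0 rest) hs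

-- L3: the whole loop is fillLines over the '\n'-split
theorem loop_lines (length : Int) (cs : List Char) :
    ∀ (data : List (List String)) (i : Nat), (i : Int) < length →
    getBangunanLoop length data i 0 cs = fillLines length data i (sp1 '\n' cs) := by
  induction hn : cs.length using Nat.strong_induction_on generalizing cs with
  | _ n ihn =>
    intro data i hi
    rcases sp1_decomp '\n' cs with ⟨hnm, hs⟩ | ⟨line, rest, hcs, hnm, hs⟩
    · rw [hs, ← List.append_nil cs, loop_line length cs hnm [] data i 0 hi]
      simp only [fillLines, getBangunanLoop]
      split <;> simp
    · subst hcs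
      rw [hs, loop_line length line hnm ('\n' :: rest) data i 0 hi, loop_cons]
      simp only [if_pos rfl, if_neg (by simp : ¬ (('\n':Char) ≠ ';' ∧ ('\n':Char) ≠ '\n')),
        fillLines]
      by_cases hb : length ≤ (i : Int) + 1
      · rw [if_pos (by push_cast; omega), if_pos hb]
      · rw [if_neg (by push_cast; omega), if_neg hb]
        exact ihn rest.length (by simp at hn; omega) rest rfl _ (i+1) (by push_cast; omega)

theorem empty_append_ofList (l : List Char) : "" ++ String.ofList l = String.ofList l := by
  apply String.toList_inj.mp; simp

theorem rowFill_all_nil (row : List String) (j : Nat) (cells : List (List Char))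
    (h : ∀ cell ∈ cells, cell = []) :
    rowFill row j cells = row := by
  induction cells generalizing row j with
  | nil => rfl
  | cons cell cells ih =>
    have hc : cell = [] := h cell List.mem_cons_self
    subst hc
    rw [rowFill_nil_cell, ih row (j+1) (fun c hc => h c (List.mem_cons_of_mem _ hc))]

theorem rowFill_spec (k : Nat) (cells : List (List Char)) :
    ∀ (j : Nat) (prefRow : List String), prefRow.length = j → j ≤ k →
      (∀ m (hm : m < cells.length), cells[m] ≠ [] → j + m < k) →
    rowFill (prefRow ++ List.replicate (k - j) "") j cells =
      prefRow ++ (List.range (k - j)).map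
        (fun m => if h : m < cells.length then String.ofList cells[m] else "") := by
  induction cells with
  | nil =>
    intro j prefRow hp hj h
    simp only [rowFill, List.length_nil, Nat.not_lt_zero, dite_false]
    rw [List.map_const', List.length_range]
  | cons cell cells ih =>
    intro j prefRow hp hj h
    by_cases hjk : j = k
    · subst hjk
      simp only [Nat.sub_self, List.replicate_zero, List.append_nil, List.range_zero,
        List.map_nil]
      refine rowFill_all_nil prefRow j (cell :: cells) ?_
      intro c hc
      rcases List.mem_iff_getElem.mp hc with ⟨m, hm, rfl⟩
      by_contra hne
      exact absurd (h m hm hne) (by omega)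
    · have hjk' : j < k := by omega
      have hrep : k - j = (k - (j+1)) + 1 := by omega
      rw [hrep, List.replicate_succ]
      simp only [rowFill]
      rw [← hp, modify_append_cons, empty_append_ofList]
      have : prefRow ++ String.ofList cell :: List.replicate (k - (prefRow.length + 1)) "" =
          (prefRow ++ [String.ofList cell]) ++ List.replicate (k - (prefRow.length + 1)) "" := by
        simp
      rw [hp] at this ⊢
      rw [this, ih (j+1) (prefRow ++ [String.ofList cell]) (by simp [hp]) (by omega)
        (fun m hm hne => by have := h (m+1) (by simpa using hm) (by simpa using hne); omega)]
      rw [List.range_succ_eq_map, List.append_assoc]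
      congr 1
      simp only [List.cons_append, List.nil_append, List.map_cons, List.map_map]
      refine List.cons_eq_cons.mpr ⟨?_, ?_⟩
      · rw [dif_pos (by simp)]
        simp
      · apply List.map_congr_left
        intro m _
        simp only [Function.comp]
        by_cases hm : m < cells.length
        · rw [dif_pos (by simpa using hm),
            dif_pos (show m.succ < (cell :: cells).length by simpa using hm)]
          simp
        · rw [dif_neg (by simpa using hm),
            dif_neg (show ¬ m.succ < (cell :: cells).length by simpa using hm)]

theorem fillLines_spec (length : Int) (k : Nat) (lines : List (List Char)) :
    ∀ (i : Nat) (pref : List (List String)), (i : Int) < length → pref.length = i →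
      (∀ line ∈ lines.take (length.toNat - i), ∀ m (hm : m < (sp1 ';' line).length),
        (sp1 ';' line)[m] ≠ [] → m < k) →
    fillLines length (pref ++ List.replicate (length.toNat - i) (List.replicate k "")) i lines =
      pref ++ (lines.take (length.toNat - i)).map
          (fun line => (List.range k).map
            (fun m => if h : m < (sp1 ';' line).length then String.ofList (sp1 ';' line)[m] else ""))
        ++ List.replicate (length.toNat - i - lines.length) (List.replicate k "") := by
  induction lines with
  | nil =>
    intro i pref hi hp hpre
    simp [fillLines]
  | cons line rest ih =>
    intro i pref hi hp hpre
    subst hp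
    have hrep : length.toNat - pref.length = (length.toNat - (pref.length+1)) + 1 := by omega
    have hline : line ∈ (line :: rest).take (length.toNat - pref.length) := by
      rw [hrep]; exact List.mem_cons_self
    simp only [fillLines]
    rw [hrep]
    simp only [List.take_succ_cons, List.replicate_succ, List.map_cons, List.length_cons,
      Nat.succ_sub_succ]
    rw [modify_append_cons,
      show List.replicate k "" = ([] : List String) ++ List.replicate (k - 0) "" by simp,
      rowFill_spec k (sp1 ';' line) 0 [] rfl (by omega)
        (fun m hm hne => by simpa using hpre line hline m hm hne)]
    simp only [List.nil_append, Nat.sub_zero]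
    set newRow := (List.range k).map
      (fun m => if h : m < (sp1 ';' line).length then String.ofList (sp1 ';' line)[m] else "")
      with hnewRow
    by_cases hb : length ≤ (pref.length : Int) + 1
    · rw [if_pos hb]
      have h0 : length.toNat - (pref.length + 1) = 0 := by omega
      rw [h0]
      simp
    · rw [if_neg hb]
      have hlen' : (pref ++ [newRow]).length = pref.length + 1 := by simp
      have hsplit : pref ++ newRow ::
            List.replicate (length.toNat - (pref.length+1)) (List.replicate k "") =
          (pref ++ [newRow]) ++
            List.replicate (length.toNat - (pref ++ [newRow]).length) (List.replicate k "") := by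
        rw [hlen']; simp
      rw [hsplit, show pref.length + 1 = (pref ++ [newRow]).length from hlen'.symm,
        ih ((pref ++ [newRow]).length) (pref ++ [newRow]) (by rw [hlen']; push_cast; omega) rfl
        (fun l hl m hm hne => hpre l (by
          rw [hrep, List.take_succ_cons]
          refine List.mem_cons_of_mem _ ?_
          rw [hlen'] at hl
          exact hl) m hm hne)]
      rw [hlen']
      simp

theorem take_map_blank {α β : Type} (g : α → β) (blank : β) (rows : List α) (t : Nat) :
    (rows.take t).map g ++ List.replicate (t - rows.length) blank =
      (List.range t).map (fun i => if h : i < rows.length then g rows[i] else blank) := by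
  apply List.ext_getElem
  · simp; omega
  · intro n h1 h2
    simp only [List.length_append, List.length_map, List.length_take,
      List.length_replicate] at h1
    simp only [List.length_map, List.length_range] at h2
    simp only [List.getElem_map, List.getElem_range]
    by_cases hn : n < min t rows.length
    · rw [List.getElem_append_left (by simpa using hn)]
      simp only [List.getElem_map, List.getElem_take]
      rw [dif_pos (by omega)]
    · rw [List.getElem_append_right (by simp; omega)]
      simp only [List.getElem_replicate]
      rw [dif_neg (by omega)]

-- ===== VERDICT (by name: the statement is the Claim_ definition above) =====
theorem getBangunan_spec : Claim_equal_getBangunan := by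
  intro length category StringOF _ hpre
  unfold Spec_getBangunan getBangunan getBangunan_alt
  by_cases h0 : length = 0
  · rw [if_pos h0, if_pos h0]
  · rw [if_neg h0, if_neg h0]
    dsimp only
    by_cases hneg : length < 0
    · have ht : length.toNat = 0 := by omega
      rw [ht]
      simp only [List.replicate_zero, List.range_zero, List.map_nil]
      cases hcs : StringOF.toList with
      | nil => rfl
      | cons c rest =>
        rw [loop_cons, if_pos (by split <;> (push_cast; omega))]
    · have hpos : 0 < length := by omega
      rw [show (List.range length.toNat).map (fun _ => List.replicate category.toNat "") =
            List.replicate length.toNat (List.replicate category.toNat "") by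
          rw [List.map_const', List.length_range]]
      rw [loop_lines length StringOF.toList _ 0 (by push_cast; omega)]
      rcases hpre with h | hpre
      · exact absurd h h0
      simp only [splitOn_eq_sp1] at hpre
      have hpre' : ∀ line ∈ (sp1 '\n' StringOF.toList).take (length.toNat - 0),
          ∀ m (hm : m < (sp1 ';' line).length), (sp1 ';' line)[m] ≠ [] → m < category.toNat := by
        intro line hline m hm hne
        have hmem : ((sp1 ';' line)[m], m) ∈ (sp1 ';' line).zipIdx := by
          have := List.getElem_zipIdx (l := sp1 ';' line) (i := m) (j := 0)
            (h := by simpa using hm)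
          rw [show (0 : Nat) + m = m by omega] at this
          rw [← this]
          exact List.getElem_mem _
        have := hpre line (by simpa using hline) ((sp1 ';' line)[m], m) hmem hne
        omega
      have hfill := fillLines_spec length category.toNat (sp1 '\n' StringOF.toList) 0 []
        (by push_cast; omega) rfl hpre'
      simp only [List.nil_append, Nat.sub_zero] at hfill
      rw [hfill, take_map_blank]
      refine congrArg (fun d => (d, length)) ?_
      apply List.map_congr_left
      intro i _
      by_cases hi : i < (sp1 '\n' StringOF.toList).length
      · rw [dif_pos hi, dif_pos (by simpa [splitOn_eq_sp1] using hi)]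
        simp only [splitOn_eq_sp1]
      · rw [dif_neg hi, dif_neg (by simpa [splitOn_eq_sp1] using hi)]
        simp only [List.length_nil, Nat.not_lt_zero, dite_false]
        rw [List.map_const', List.length_range]
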